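-- pv_equiv track=rewrite | github.com/ikanashov/algo_grok | some_algo/max_unique.py | get_max_unique
-- ===== SOURCE A (Python) =====
-- def get_max_unique(list1: list[int]) -> int:
--     if not list1:
--         return None
--     cnt_map = {}
--
--     max_item = float("-inf")
--
--     for item in list1:
--         if item not in cnt_map:
--             cnt_map[item] = 1
--         else:
--             cnt_map[item] += 1
--
--     for key, value in cnt_map.items():
--         if key > max_item and value == 1:
--             max_item = key
--
--     return max_item if max_item != float("-inf") and cnt_map[max_item] < 2 else None
-- ===== SOURCE B (Python) =====
-- def get_max_unique(list1):
--     best = None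
--     run_val = None
--     run_len = 0
--     for x in sorted(list1):
--         if x == run_val:
--             run_len += 1
--         else:
--             if run_len == 1:
--                 best = run_val
--             run_val = x
--             run_len = 1
--     if run_len == 1:
--         best = run_val
--     return best
-- ===== Notes on version B (the rewrite author's own statement) =====
-- stated objective: alternative
-- what changed: Replaced A's hash-map frequency count followed by a scan over dict items with a sort-then-run-length scan: B walks sorted(list1) once, detecting runs of equal values and keeping the last (hence largest) value whose run has length exactly 1.
import Mathlib
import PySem

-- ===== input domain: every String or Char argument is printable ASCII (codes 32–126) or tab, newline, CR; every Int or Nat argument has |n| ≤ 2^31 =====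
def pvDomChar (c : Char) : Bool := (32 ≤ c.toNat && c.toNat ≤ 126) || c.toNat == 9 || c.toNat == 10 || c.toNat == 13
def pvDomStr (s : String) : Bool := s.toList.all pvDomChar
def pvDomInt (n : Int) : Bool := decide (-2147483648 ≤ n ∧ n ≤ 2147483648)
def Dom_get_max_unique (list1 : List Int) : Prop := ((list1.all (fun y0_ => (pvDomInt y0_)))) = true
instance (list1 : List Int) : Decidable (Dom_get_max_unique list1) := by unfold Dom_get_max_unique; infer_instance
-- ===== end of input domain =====

-- B replaces A's hash-map frequency count + items scan by a single run-length scan of sorted(list1); alternative decomposition, not claimed faster.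

-- ===== PORT A =====
-- literal port of A; max_item : Option Int with none playing float("-inf")
def get_max_unique (list1 : List Int) : Option Int :=
  if list1 = [] then none
  else
    let cnt_map := list1.foldl (fun d item =>
      if !(d.contains item) then d.insert item (1 : Int) else d.modify item 0 (· + 1))
      PySem.Dict.empty
    let max_item := cnt_map.items.foldl (fun m kv =>
      if (match m with | none => true | some x => decide (x < kv.1)) && (kv.2 == (1 : Int))
      then some kv.1 else m) (none : Option Int)
    match max_item with
    | none => none
    -- x is always a key of cnt_map (it came from its items), so Python's cnt_map[max_item] is getD x 0
    | some x => if cnt_map.getD x 0 < 2 then some x else none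

-- ===== PORT B =====
-- state = (best, run_val, run_len); one loop step of Source B
def bStep (st : Option Int × Option Int × Int) (x : Int) : Option Int × Option Int × Int :=
  if some x = st.2.1 then (st.1, st.2.1, st.2.2 + 1)
  else ((if st.2.2 = 1 then st.2.1 else st.1), some x, 1)

def get_max_unique_alt (list1 : List Int) : Option Int :=
  let st := (PySem.List.sorted list1 (fun x => x) false).foldl bStep (none, none, 0)
  if st.2.2 = 1 then st.2.1 else st.1

-- ===== PRECONDITION & SPEC =====
def Spec_get_max_unique (list1 : List Int) (out : Option Int) : Prop := out = get_max_unique_alt list1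
instance (list1 : List Int) (out : Option Int) : Decidable (Spec_get_max_unique list1 out) := by unfold Spec_get_max_unique; infer_instance

-- ===== CLAIM (what is proved, stated in full; the proofs are below) =====
def Claim_equal_get_max_unique : Prop := ∀ (list1 : List Int), Dom_get_max_unique list1 → Spec_get_max_unique list1 (get_max_unique list1)

-- ===== LEMMAS AND PROOFS =====

-- reference value: the largest element of l occurring exactly once (none if there is none)
def M (l : List Int) : Option Int :=
  ((PySem.Set.ofList l).filter (fun k => ((l.count k : Int) == 1))).max?

theorem int_max?_some (l : List Int) (m : Int) : l.max? = some m ↔ m ∈ l ∧ ∀ b ∈ l, b ≤ m :=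
  List.max?_eq_some_iff

theorem mem_cand (l : List Int) (m : Int) :
    m ∈ ((PySem.Set.ofList l).filter (fun k => ((l.count k : Int) == 1))) ↔ m ∈ l ∧ l.count m = 1 := by
  simp only [List.mem_filter, PySem.Set.mem_ofList, beq_iff_eq]
  constructor
  · rintro ⟨h1, h2⟩; exact ⟨h1, by omega⟩
  · rintro ⟨h1, h2⟩; exact ⟨h1, by omega⟩

theorem M_some (l : List Int) (m : Int) :
    M l = some m ↔ (l.count m = 1 ∧ ∀ z ∈ l, l.count z = 1 → z ≤ m) := by
  rw [M, int_max?_some]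
  constructor
  · rintro ⟨hm, hb⟩
    rw [mem_cand] at hm
    exact ⟨hm.2, fun z hz hc => hb z ((mem_cand l z).mpr ⟨hz, hc⟩)⟩
  · rintro ⟨hc, hb⟩
    refine ⟨(mem_cand l m).mpr ⟨List.count_pos_iff.mp (by omega), hc⟩, fun z hz => ?_⟩
    rw [mem_cand] at hz
    exact hb z hz.1 hz.2

theorem M_none (l : List Int) : M l = none ↔ ∀ z ∈ l, l.count z ≠ 1 := by
  rw [M, List.max?_eq_none_iff, List.eq_nil_iff_forall_not_mem]
  constructor
  · intro h z hz hc
    exact h z ((mem_cand l z).mpr ⟨hz, hc⟩)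
  · intro h z hz
    rw [mem_cand] at hz
    exact h z hz.1 hz.2

-- ---------- A-side ----------

theorem stepA_eq (d : PySem.Dict Int Int) (x : Int) :
    (if !(d.contains x) then d.insert x (1 : Int) else d.modify x 0 (· + 1)) = d.modify x 0 (· + 1) := by
  by_cases h : d.contains x
  · simp [h]
  · have hn : (d.get? x).isSome = false := by
      rw [← PySem.Dict.contains_eq_isSome_get?]; simpa using h
    have hgnone : d.get? x = none := by
      cases hcase : d.get? x with
      | none => rfl
      | some v => rw [hcase] at hn; simp at hn
    have hg : d.getD x 0 = 0 := by simp [PySem.Dict.getD, hgnone]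
    simp [h, PySem.Dict.modify, hg]

theorem cntA_eq (l : List Int) :
    l.foldl (fun d item =>
      if !(d.contains item) then d.insert item (1 : Int) else d.modify item 0 (· + 1))
      PySem.Dict.empty = PySem.Dict.counter l := by
  rw [PySem.Dict.counter_eq_foldl]
  congr 1
  funext d x
  exact stepA_eq d x

def omax : Option Int → Int → Option Int
  | none, k => some k
  | some x, k => some (max x k)

theorem stepMax_eq (m : Option Int) (kv : Int × Int) :
    (if (match m with | none => true | some x => decide (x < kv.1)) && (kv.2 == (1 : Int))
     then some kv.1 else m) = if (kv.2 == (1 : Int)) then omax m kv.1 else m := by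
  cases m with
  | none => by_cases h : kv.2 = 1 <;> simp [h, omax]
  | some x =>
    by_cases h : kv.2 = 1
    · by_cases hx : x < kv.1
      · simp [h, hx, omax, max_eq_right (le_of_lt hx)]
      · simp [h, hx, omax, max_eq_left (le_of_not_gt hx)]
    · simp [h]

theorem foldMax (L : List (Int × Int)) (m : Option Int) :
    L.foldl (fun m kv =>
      if (match m with | none => true | some x => decide (x < kv.1)) && (kv.2 == (1 : Int))
      then some kv.1 else m) m
    = ((L.filter (fun p => p.2 == (1 : Int))).map Prod.fst).foldl omax m := by
  induction L generalizing m with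
  | nil => rfl
  | cons p t ih =>
    simp only [List.foldl_cons]
    rw [stepMax_eq m p, List.filter_cons]
    by_cases h : (p.2 == (1 : Int)) = true
    · rw [if_pos h, if_pos h, List.map_cons, List.foldl_cons]
      exact ih _
    · rw [if_neg h, if_neg h]
      exact ih _

theorem foldl_omax_some (cs : List Int) (x : Int) :
    cs.foldl omax (some x) = some (cs.foldl max x) := by
  induction cs generalizing x with
  | nil => rfl
  | cons c t ih => simp [omax, ih]

theorem foldl_omax_none (cs : List Int) : cs.foldl omax none = cs.max? := by
  cases cs with
  | nil => rfl
  | cons c t => rw [List.foldl_cons, show omax none c = some c from rfl, foldl_omax_some]; rfl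

theorem A_eq_M (l : List Int) : get_max_unique l = M l := by
  by_cases hl : l = []
  · subst hl; rfl
  · unfold get_max_unique
    rw [if_neg hl]
    simp only [cntA_eq]
    rw [show (PySem.Dict.counter l).items = (PySem.Set.ofList l).map (fun k => (k, (l.count k : Int))) from PySem.Dict.items_counter l]
    rw [foldMax]
    rw [List.filter_map, List.map_map]
    have hmm : ((PySem.Set.ofList l).filter
        (((fun p : Int × Int => p.2 == (1 : Int)) ∘ (fun k => (k, (l.count k : Int)))))).map
        (Prod.fst ∘ (fun k => (k, (l.count k : Int))))
        = (PySem.Set.ofList l).filter (fun k => ((l.count k : Int) == 1)) := by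
      have h1 : (Prod.fst ∘ fun k : Int => (k, (l.count k : Int))) = id := rfl
      have h2 : ((fun p : Int × Int => p.2 == (1 : Int)) ∘ fun k : Int => (k, (l.count k : Int)))
          = (fun k : Int => ((l.count k : Int) == 1)) := rfl
      rw [h1, h2, List.map_id]
    rw [hmm, foldl_omax_none]
    change (match M l with
      | none => none
      | some x => if (PySem.Dict.counter l).getD x 0 < 2 then some x else none) = M l
    rcases h : M l with _ | x
    · rfl
    · have hx := ((M_some l x).mp h).1
      simp only [PySem.Dict.getD_counter]
      rw [if_pos (by omega)]

-- ---------- B-side ----------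

theorem eq_of_mem_takeWhile {y z : Int} {t : List Int} (hz : z ∈ t.takeWhile (· == y)) : z = y := by
  have h := List.mem_takeWhile_imp hz
  simpa using h

theorem run_fold (x : Int) (t1 : List Int) (h : ∀ z ∈ t1, z = x) (b : Option Int) (n : Int) :
    t1.foldl bStep (b, some x, n) = (b, some x, n + t1.length) := by
  induction t1 generalizing n with
  | nil => simp
  | cons z t ih =>
    have hz : z = x := h z (by simp)
    rw [List.foldl_cons, show bStep (b, some x, n) z = (b, some x, n + 1) from by
      simp [bStep, hz]]
    rw [ih (fun w hw => h w (by simp [hw])) (n + 1)]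
    simp; ring

theorem lt_of_mem_dropWhile (y : Int) (t : List Int) (hp : (y :: t).Pairwise (· ≤ ·)) :
    ∀ z ∈ t.dropWhile (· == y), y < z := by
  induction t with
  | nil => simp
  | cons w t ih =>
    intro z hz
    by_cases hw : (w == y) = true
    · rw [List.dropWhile_cons, if_pos hw] at hz
      have hp' : (y :: t).Pairwise (· ≤ ·) := by
        have : (y :: t).Sublist (y :: w :: t) := by
          exact List.Sublist.cons₂ y (List.sublist_cons_self w t)
        exact hp.sublist this
      exact ih hp' z hz
    · rw [List.dropWhile_cons, if_neg hw] at hz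
      have hyw : y ≤ w := (List.pairwise_cons.mp hp).1 w (by simp)
      have hyw' : y < w := lt_of_le_of_ne hyw (fun hh => hw (by simp [hh]))
      rcases List.mem_cons.mp hz with rfl | hz'
      · exact hyw'
      · have hwt : w ≤ z := ((List.pairwise_cons.mp (List.pairwise_cons.mp hp).2).1) z hz'
        omega

theorem count_run (y : Int) (t : List Int) (hp : (y :: t).Pairwise (· ≤ ·)) :
    (y :: t).count y = 1 + (t.takeWhile (· == y)).length := by
  conv_lhs => rw [show t = t.takeWhile (· == y) ++ t.dropWhile (· == y) from (List.takeWhile_append_dropWhile).symm]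
  rw [List.count_cons_self, List.count_append]
  have h1 : (t.takeWhile (· == y)).count y = (t.takeWhile (· == y)).length := by
    rw [List.count_eq_length]
    intro z hz
    exact (eq_of_mem_takeWhile hz).symm
  have h2 : (t.dropWhile (· == y)).count y = 0 := by
    rw [List.count_eq_zero]
    intro hy
    exact absurd rfl (ne_of_lt (lt_of_mem_dropWhile y t hp y hy))
  omega

theorem count_rest (y z : Int) (t : List Int) (hz : z ≠ y) :
    (y :: t).count z = (t.dropWhile (· == y)).count z := by
  conv_lhs => rw [show t = t.takeWhile (· == y) ++ t.dropWhile (· == y) from (List.takeWhile_append_dropWhile).symm]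
  rw [List.count_cons, List.count_append, if_neg (by simpa using (Ne.symm hz))]
  have h1 : (t.takeWhile (· == y)).count z = 0 := by
    rw [List.count_eq_zero]
    intro hzm
    exact hz (eq_of_mem_takeWhile hzm)
  omega

theorem mem_split (y z : Int) (t : List Int) (hz : z ∈ y :: t) (hne : z ≠ y) :
    z ∈ t.dropWhile (· == y) := by
  rcases List.mem_cons.mp hz with rfl | hz'
  · exact absurd rfl hne
  · rw [show t = t.takeWhile (· == y) ++ t.dropWhile (· == y) from (List.takeWhile_append_dropWhile).symm] at hz'
    rcases List.mem_append.mp hz' with h | h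
    · exact absurd (eq_of_mem_takeWhile h) hne
    · exact h

theorem M_run (y : Int) (t : List Int) (hp : (y :: t).Pairwise (· ≤ ·)) :
    M (y :: t) = match M (t.dropWhile (· == y)) with
      | some mm => some mm
      | none => if t.takeWhile (· == y) = [] then some y else none := by
  rcases hrest : M (t.dropWhile (· == y)) with _ | mm
  · rw [M_none] at hrest
    by_cases ht1 : t.takeWhile (· == y) = []
    · have hys : M (y :: t) = some y := by
        rw [M_some]
        refine ⟨by rw [count_run y t hp, ht1]; rfl, fun z hz hc => ?_⟩
        by_cases hzy : z = y
        · omega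
        · exact absurd hc (by rw [count_rest y z t hzy]; exact hrest z (mem_split y z t hz hzy))
      simp [ht1, hys]
    · have hys : M (y :: t) = none := by
        rw [M_none]
        intro z hz hc
        by_cases hzy : z = y
        · subst hzy
          rw [count_run z t hp] at hc
          have : (t.takeWhile (· == z)).length ≠ 0 := fun h => ht1 (List.eq_nil_of_length_eq_zero h)
          omega
        · rw [count_rest y z t hzy] at hc
          exact hrest z (mem_split y z t hz hzy) hc
      simp [ht1, hys]
  · rw [M_some] at hrest
    rw [M_some]
    have hmm_mem : mm ∈ t.dropWhile (· == y) := List.count_pos_iff.mp (by omega)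
    have hymm : y < mm := lt_of_mem_dropWhile y t hp mm hmm_mem
    refine ⟨by rw [count_rest y mm t (by omega)]; exact hrest.1, fun z hz hc => ?_⟩
    by_cases hzy : z = y
    · omega
    · rw [count_rest y z t hzy] at hc
      exact hrest.2 z (mem_split y z t hz hzy) hc

theorem B_run : ∀ (n : Nat) (s : List Int), s.length ≤ n → s.Pairwise (· ≤ ·) →
    ∀ (x : Int), (∀ z ∈ s, x < z) → ∀ (b : Option Int) (rl : Int),
    (if (s.foldl bStep (b, some x, rl)).2.2 = 1 then (s.foldl bStep (b, some x, rl)).2.1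
     else (s.foldl bStep (b, some x, rl)).1)
    = match M s with
      | some mm => some mm
      | none => if rl = 1 then some x else b := by
  intro n
  induction n with
  | zero =>
    intro s hs _ x _ b rl
    rw [List.eq_nil_of_length_eq_zero (Nat.le_zero.mp hs)]
    rfl
  | succ n ih =>
    intro s hs hp x hx b rl
    cases s with
    | nil => rfl
    | cons y t =>
      have hxy : x < y := hx y (by simp)
      have hstep : bStep (b, some x, rl) y = ((if rl = 1 then some x else b), some y, 1) := by
        simp [bStep]
        intro h
        omega
      rw [List.foldl_cons, hstep]
      conv_lhs => rw [show t = t.takeWhile (· == y) ++ t.dropWhile (· == y) from (List.takeWhile_append_dropWhile).symm]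
      rw [List.foldl_append]
      rw [run_fold y (t.takeWhile (· == y))
        (fun z hz => eq_of_mem_takeWhile hz) _ 1]
      have hrest_len : (t.dropWhile (· == y)).length ≤ n := by
        have := t.length_dropWhile_le (· == y)
        simp at hs
        omega
      have hrest_pair : (t.dropWhile (· == y)).Pairwise (· ≤ ·) :=
        hp.sublist ((t.dropWhile_sublist (· == y)).trans (List.sublist_cons_self y t))
      rw [ih (t.dropWhile (· == y)) hrest_len hrest_pair y (lt_of_mem_dropWhile y t hp) _ _]
      rw [M_run y t hp]
      rcases M (t.dropWhile (· == y)) with _ | mm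
      · simp only
        have : ((1 : Int) + (t.takeWhile (· == y)).length = 1) ↔ t.takeWhile (· == y) = [] := by
          constructor
          · intro h
            exact List.eq_nil_of_length_eq_zero (by omega)
          · intro h
            rw [h]; rfl
        by_cases h : t.takeWhile (· == y) = []
        · rw [if_pos (this.mpr h), if_pos h]
        · rw [if_neg (fun hh => h (this.mp hh)), if_neg h]
      · rfl

theorem M_sorted_eq (l : List Int) : M (PySem.List.sorted l (fun x => x) false) = M l := by
  have hperm : (PySem.List.sorted l (fun x => x) false).Perm l := PySem.List.sorted_perm l _ _
  have hcnt : ∀ z : Int, (PySem.List.sorted l (fun x => x) false).count z = l.count z :=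
    fun z => hperm.count_eq z
  have hmem : ∀ z : Int, z ∈ (PySem.List.sorted l (fun x => x) false) ↔ z ∈ l :=
    fun z => hperm.mem_iff
  rcases h : M l with _ | m
  · rw [M_none] at h ⊢
    intro z hz
    rw [hcnt]
    exact h z ((hmem z).mp hz)
  · rw [M_some] at h ⊢
    refine ⟨by rw [hcnt]; exact h.1, fun z hz hc => ?_⟩
    rw [hcnt] at hc
    exact h.2 z ((hmem z).mp hz) hc

theorem B_eq_M (l : List Int) : get_max_unique_alt l = M l := by
  unfold get_max_unique_alt
  rw [← M_sorted_eq l]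
  have hp : (PySem.List.sorted l (fun x => x) false).Pairwise (· ≤ ·) :=
    PySem.List.sorted_pairwise l _
  rcases hs : PySem.List.sorted l (fun x => x) false with _ | ⟨x, t⟩
  · rfl
  · rw [hs] at hp
    simp only [List.foldl_cons, show bStep (none, none, 0) x = (none, some x, 1) from by simp [bStep]]
    conv_lhs => rw [show t = t.takeWhile (· == x) ++ t.dropWhile (· == x) from (List.takeWhile_append_dropWhile).symm]
    rw [List.foldl_append]
    rw [run_fold x (t.takeWhile (· == x))
      (fun z hz => eq_of_mem_takeWhile hz) _ 1]
    rw [B_run (t.dropWhile (· == x)).length (t.dropWhile (· == x)) le_rfl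
      (hp.sublist ((t.dropWhile_sublist (· == x)).trans (List.sublist_cons_self x t)))
      x (lt_of_mem_dropWhile x t hp) _ _]
    rw [M_run x t hp]
    rcases M (t.dropWhile (· == x)) with _ | mm
    · simp only
      have heq : ((1 : Int) + (t.takeWhile (· == x)).length = 1) ↔ t.takeWhile (· == x) = [] := by
        constructor
        · intro h
          exact List.eq_nil_of_length_eq_zero (by omega)
        · intro h
          rw [h]; rfl
      by_cases h : t.takeWhile (· == x) = []
      · rw [if_pos (heq.mpr h), if_pos h]
      · rw [if_neg (fun hh => h (heq.mp hh)), if_neg h]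
    · rfl

-- ===== VERDICT (by name: the statement is the Claim_ definition above) =====
theorem get_max_unique_spec : Claim_equal_get_max_unique := by
  intro l _
  exact (A_eq_M l).trans (B_eq_M l).symm
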